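-- pv_equiv track=rewrite | github.com/sourcegraph/CodeScaleBench | scripts/find_mcp_distracted.py | get_task_name_from_dir
-- ===== SOURCE A (Python) =====
-- SDLC_SUITES = {"build", "feature", "refactor", "debug", "design", "document", "fix", "secure", "test", "understand"}
--
-- def get_task_name_from_dir(task_dir_name):
--     """Extract canonical task name from dir like ccb_build_bustub-hyperloglog-impl-001_baseline."""
--     name = task_dir_name
--     for suite in SDLC_SUITES:
--         # Try new naming first, then legacy
--         for fmt in (f"csb_sdlc_{suite}_", f"ccb_{suite}_"):
--             if name.startswith(fmt):
--                 name = name[len(fmt):]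
--                 break
--         else:
--             continue
--         break
--
--     for suffix in ("_sourcegraph_full", "_baseline"):
--         if name.endswith(suffix):
--             name = name[:-len(suffix)]
--             break
--
--     return name
-- ===== SOURCE B (Python) =====
-- SDLC_SUITES = {"build", "feature", "refactor", "debug", "design", "document", "fix", "secure", "test", "understand"}
--
--
-- def get_task_name_from_dir(task_dir_name):
--     """Extract canonical task name: strip the leader, take the segment up to the
--     next '_' and test it against the suite set once, instead of scanning all
--     suite/format combinations."""
--     name = task_dir_name
--     for lead in ("csb_sdlc_", "ccb_"):
--         if name.startswith(lead):
--             rest = name[len(lead):]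
--             i = rest.find("_")
--             if i >= 0 and rest[:i] in SDLC_SUITES:
--                 name = rest[i + 1:]
--             break
--     if name.endswith("_sourcegraph_full"):
--         name = name[:-len("_sourcegraph_full")]
--     elif name.endswith("_baseline"):
--         name = name[:-len("_baseline")]
--     return name
-- ===== Notes on version B (the rewrite author's own statement) =====
-- stated objective: simpler
-- what changed: Instead of scanning all 10 suites x 2 prefix formats with nested loops, B tests the two leaders once, extracts the segment up to the next underscore with find/slice, and checks it against the suite set with a single membership test; the suffix strip becomes a plain if/elif chain.
import Mathlib
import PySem

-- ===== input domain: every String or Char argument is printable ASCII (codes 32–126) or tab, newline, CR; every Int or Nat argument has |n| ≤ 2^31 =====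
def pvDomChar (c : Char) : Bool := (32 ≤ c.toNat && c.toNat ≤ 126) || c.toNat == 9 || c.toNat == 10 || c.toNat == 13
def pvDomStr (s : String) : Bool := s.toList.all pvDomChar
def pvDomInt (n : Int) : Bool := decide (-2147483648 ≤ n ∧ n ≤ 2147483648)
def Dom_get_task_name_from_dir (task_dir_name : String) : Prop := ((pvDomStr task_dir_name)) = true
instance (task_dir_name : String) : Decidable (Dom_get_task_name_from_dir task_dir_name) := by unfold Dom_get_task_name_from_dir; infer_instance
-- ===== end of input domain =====

-- B strips the leader once and tests the next '_'-delimited segment against the suite set,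
-- instead of A's scan over all 10 suites × 2 prefix formats (objective: simpler, same cost).

-- ===== PORT A =====

-- Python module-level SDLC_SUITES set, shared by both ports (A iterates over this set with
-- break-on-first-hit; the result is order-independent because at most one prefix format can
-- match a given string, which the equivalence proof below implies; ported in literal order).
def pvSDLC_SUITES : PySem.Set String :=
  PySem.Set.ofList ["build", "feature", "refactor", "debug", "design", "document",
                    "fix", "secure", "test", "understand"]

-- the for-suite/for-fmt loop with its two break/continue exits
def pvStripSuiteA : List String → String → String
  | [], name => name
  | suite :: rest, name =>
    if PySem.Str.startswith name ("csb_sdlc_" ++ suite ++ "_") then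
      PySem.Str.slice name (some (PySem.Str.len ("csb_sdlc_" ++ suite ++ "_"))) none
    else if PySem.Str.startswith name ("ccb_" ++ suite ++ "_") then
      PySem.Str.slice name (some (PySem.Str.len ("ccb_" ++ suite ++ "_"))) none
    else pvStripSuiteA rest name

def get_task_name_from_dir (task_dir_name : String) : String :=
  let name := pvStripSuiteA pvSDLC_SUITES task_dir_name
  if PySem.Str.endswith name "_sourcegraph_full" then
    PySem.Str.slice name none (some (-(PySem.Str.len "_sourcegraph_full")))
  else if PySem.Str.endswith name "_baseline" then
    PySem.Str.slice name none (some (-(PySem.Str.len "_baseline")))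
  else name

-- ===== PORT B =====

-- body of B's for-lead loop (runs for the first matching lead, then break)
def pvStripLeadB (task_dir_name lead : String) : String :=
  let rest := PySem.Str.slice task_dir_name (some (PySem.Str.len lead)) none
  let i := PySem.Str.find rest "_"
  if 0 ≤ i ∧ PySem.Set.contains pvSDLC_SUITES (PySem.Str.slice rest none (some i)) = true then
    PySem.Str.slice rest (some (i + 1)) none
  else task_dir_name

def get_task_name_from_dir_alt (task_dir_name : String) : String :=
  let name :=
    if PySem.Str.startswith task_dir_name "csb_sdlc_" then
      pvStripLeadB task_dir_name "csb_sdlc_"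
    else if PySem.Str.startswith task_dir_name "ccb_" then
      pvStripLeadB task_dir_name "ccb_"
    else task_dir_name
  if PySem.Str.endswith name "_sourcegraph_full" then
    PySem.Str.slice name none (some (-(PySem.Str.len "_sourcegraph_full")))
  else if PySem.Str.endswith name "_baseline" then
    PySem.Str.slice name none (some (-(PySem.Str.len "_baseline")))
  else name

-- ===== PRECONDITION & SPEC =====
def Spec_get_task_name_from_dir (task_dir_name : String) (out : String) : Prop := out = get_task_name_from_dir_alt task_dir_name
instance (task_dir_name : String) (out : String) : Decidable (Spec_get_task_name_from_dir task_dir_name out) := by unfold Spec_get_task_name_from_dir; infer_instance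

-- ===== CLAIM (what is proved, stated in full; the proofs are below) =====
def Claim_equal_get_task_name_from_dir : Prop := ∀ (task_dir_name : String), Dom_get_task_name_from_dir task_dir_name → Spec_get_task_name_from_dir task_dir_name (get_task_name_from_dir task_dir_name)

-- ===== LEMMAS AND PROOFS =====

-- the literal suite list
def pvSuitesL : List String :=
  ["build", "feature", "refactor", "debug", "design", "document",
   "fix", "secure", "test", "understand"]

theorem pvSDLC_SUITES_eq : pvSDLC_SUITES = pvSuitesL := by decide
theorem pvSuites_no_underscore : ∀ s ∈ pvSuitesL, '_' ∉ s.toList := by decide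

theorem pv_startswith_iff (s p : String) :
    PySem.Str.startswith s p = true ↔ p.toList <+: s.toList := by
  simp [PySem.Chars.startswith_iff]

theorem pv_toList_slice_to (s : String) (i : Int) (h : 0 ≤ i) :
    (PySem.Str.slice s none (some i)).toList = s.toList.take i.toNat := by
  simp [PySem.Str.toList_slice, PySem.List.slice_to _ h]

theorem pv_toList_slice_from (s : String) (i : Int) (h : 0 ≤ i) :
    (PySem.Str.slice s (some i) none).toList = s.toList.drop i.toNat := by
  simp [PySem.Str.toList_slice, PySem.List.slice_from _ h]

theorem pv_len_eq (s : String) : PySem.Str.len s = (s.toList.length : Int) := by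
  simp [PySem.Str.len]

-- a prefix of a prefix-with-junk
theorem pv_prefix_of_fmt (p s q t : List Char) (h : p ++ s ++ q <+: t) : p <+: t := by
  have hp := List.prefix_append p (s ++ q)
  rw [← List.append_assoc] at hp
  exact hp.trans h

-- singleton prefix ↔ head
theorem pv_singleton_prefix {c : Char} {l : List Char} : [c] <+: l ↔ l.head? = some c := by
  constructor
  · rintro ⟨t, rfl⟩; rfl
  · intro h
    cases l with
    | nil => simp at h
    | cons a t => simp at h; subst h; exact ⟨t, rfl⟩

-- the two leads are mutually exclusive prefixes
theorem pv_lead_exclusive {l : List Char}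
    (h : "csb_sdlc_".toList <+: l) : ¬ ("ccb_".toList <+: l) := by
  intro h2
  rcases List.prefix_or_prefix_of_prefix h h2 with h3 | h3
  · exact absurd h3 (by decide)
  · exact absurd h3 (by decide)

-- find of '_' when r = s ++ '_' ++ tail with '_' ∉ s
theorem pv_find_underscore {s r : List Char} (hs : '_' ∉ s)
    (hp : s ++ ['_'] <+: r) : PySem.Chars.find r ['_'] = (s.length : Int) := by
  obtain ⟨t, ht⟩ := hp
  have hinf : (['_'] : List Char) <:+: r := ⟨s, t, ht⟩
  have hnn : 0 ≤ PySem.Chars.find r ['_'] := (PySem.Chars.find_nonneg_iff _ _).mpr hinf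
  obtain ⟨hpre, hmin⟩ := PySem.Chars.find_spec hnn
  set n := (PySem.Chars.find r ['_']).toNat with hn
  have hgoal : n = s.length := by
    rcases lt_trichotomy n s.length with hlt | he | hgt
    · exfalso
      have hidx : r[n]? = some '_' := by
        rw [pv_singleton_prefix, List.head?_drop] at hpre
        exact hpre
      rw [← ht, List.getElem?_append_left (by simp; omega : n < (s ++ ['_']).length),
          List.getElem?_append_left hlt] at hidx
      exact hs (List.mem_of_getElem? hidx)
    · exact he
    · exfalso
      apply hmin s.length hgt
      rw [pv_singleton_prefix, List.head?_drop, ← ht]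
      simp
  omega

-- generic single-lead strip (B's loop body with an arbitrary membership list)
def pvStripLeadGen (S : List String) (t lead : String) : String :=
  let rest := PySem.Str.slice t (some (PySem.Str.len lead)) none
  let i := PySem.Str.find rest "_"
  if 0 ≤ i ∧ S.contains (PySem.Str.slice rest none (some i)) = true then
    PySem.Str.slice rest (some (i + 1)) none
  else t

theorem pvStripLeadB_eq_gen (t lead : String) :
    pvStripLeadB t lead = pvStripLeadGen pvSuitesL t lead := by
  unfold pvStripLeadB pvStripLeadGen
  rw [pvSDLC_SUITES_eq]
  simp [PySem.Set.contains_eq_listContains]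

-- A's loop over suites, on a string starting with `lead`, equals B's single-lead
-- strip, provided each loop step reduces to the single `lead` test (hstep; the
-- other format's test is discharged per lead in pv_prefix_phase below).
theorem pv_loop_gen (lead : String) (S : List String)
    (hS : ∀ s ∈ S, '_' ∉ s.toList) (t : String)
    (h1 : lead.toList <+: t.toList)
    (hstep : ∀ (s : String) (S' : List String),
      pvStripSuiteA (s :: S') t =
        (if PySem.Str.startswith t (lead ++ s ++ "_") = true then
          PySem.Str.slice t (some (PySem.Str.len (lead ++ s ++ "_"))) none
        else pvStripSuiteA S' t)) :
    pvStripSuiteA S t = pvStripLeadGen S t lead := by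
  obtain ⟨u, hu⟩ := h1
  have hlen0 : 0 ≤ PySem.Str.len lead := by rw [pv_len_eq]; omega
  have hrest : (PySem.Str.slice t (some (PySem.Str.len lead)) none).toList
      = t.toList.drop lead.toList.length := by
    rw [pv_toList_slice_from _ _ hlen0, pv_len_eq]
    simp
  have hud : t.toList.drop lead.toList.length = u := by rw [← hu]; simp
  induction S with
  | nil =>
    unfold pvStripSuiteA pvStripLeadGen
    simp
  | cons s S ih =>
    have hS' : ∀ x ∈ S, '_' ∉ x.toList := fun x hx => hS x (List.mem_cons_of_mem _ hx)
    rw [hstep s S]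
    by_cases hA : PySem.Str.startswith t (lead ++ s ++ "_") = true
    · -- matched: both sides strip this suite
      have hA' : s.toList ++ ['_'] <+: u := by
        rw [pv_startswith_iff] at hA
        simp only [String.toList_append] at hA
        rw [List.append_assoc, ← hu] at hA
        simpa using (List.prefix_append_right_inj _).mp hA
      have hfindS : PySem.Str.find (PySem.Str.slice t (some (PySem.Str.len lead)) none) "_"
          = ((s.toList.length : Nat) : Int) := by
        have h1' : ("_" : String).toList = ['_'] := by decide
        simp only [PySem.Str.find_eq, hrest, hud, h1']
        exact pv_find_underscore (hS s List.mem_cons_self) hA'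
      have htake : (PySem.Str.slice (PySem.Str.slice t (some (PySem.Str.len lead)) none)
          none (some ((s.toList.length : Nat) : Int))) = s := by
        apply String.toList_inj.mp
        rw [pv_toList_slice_to _ _ (by omega), hrest, hud]
        rcases hA' with ⟨w, hw⟩
        rw [← hw]
        simp
      rw [if_pos hA]
      unfold pvStripLeadGen
      simp only [hfindS, htake]
      rw [if_pos ⟨by omega, by simp⟩]
      apply String.toList_inj.mp
      rw [pv_toList_slice_from _ _ (by rw [pv_len_eq]; omega),
          pv_toList_slice_from _ _ (by omega), hrest]
      have hlenfmt : (PySem.Str.len (lead ++ s ++ "_")).toNat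
          = lead.toList.length + (s.toList.length + 1) := by
        rw [pv_len_eq]
        simp [String.toList_append]
        omega
      have h2' : (((s.toList.length : Nat) : Int) + 1).toNat = s.toList.length + 1 := by omega
      rw [hlenfmt, h2', List.drop_drop]
    · -- not matched: recurse; the s-membership on the right can never fire
      rw [if_neg hA, ih hS']
      by_cases hi : 0 ≤ PySem.Str.find (PySem.Str.slice t (some (PySem.Str.len lead)) none) "_"
      · have hne : PySem.Str.slice (PySem.Str.slice t (some (PySem.Str.len lead)) none)
            none (some (PySem.Str.find (PySem.Str.slice t (some (PySem.Str.len lead)) none) "_")) ≠ s := by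
          intro hqe
          apply hA
          set i := PySem.Str.find (PySem.Str.slice t (some (PySem.Str.len lead)) none) "_" with hi_def
          have h1' : ("_" : String).toList = ['_'] := by decide
          have hfi : PySem.Chars.find (t.toList.drop lead.toList.length) ['_'] = i := by
            rw [hi_def]; simp only [PySem.Str.find_eq, hrest, h1']
          have hpre := (PySem.Chars.find_spec (by rw [hfi]; exact hi)).1
          rw [hfi] at hpre
          have htk : (t.toList.drop lead.toList.length).take i.toNat = s.toList := by
            have := congrArg String.toList hqe
            rwa [pv_toList_slice_to _ _ hi, hrest] at this
          have hsu : s.toList ++ ['_'] <+: t.toList.drop lead.toList.length := by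
            rcases hpre with ⟨w, hw⟩
            refine ⟨w, ?_⟩
            conv_rhs => rw [← List.take_append_drop i.toNat (t.toList.drop lead.toList.length)]
            rw [htk, ← hw]
            simp
          rw [pv_startswith_iff]
          simp only [String.toList_append]
          rw [List.append_assoc]
          have hfin : lead.toList ++ (s.toList ++ ['_']) <+:
              lead.toList ++ t.toList.drop lead.toList.length :=
            (List.prefix_append_right_inj _).mpr hsu
          rw [hud, hu] at hfin
          simpa using hfin
        have hbeq : ((PySem.Str.slice (PySem.Str.slice t (some (PySem.Str.len lead)) none)
            none (some (PySem.Str.find (PySem.Str.slice t (some (PySem.Str.len lead)) none) "_"))) == s) = false := by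
          simpa using hne
        unfold pvStripLeadGen
        simp only [List.contains_cons, hbeq, Bool.false_or]
      · unfold pvStripLeadGen
        simp only
        rw [if_neg (by intro hc; exact hi hc.1), if_neg (by intro hc; exact hi hc.1)]

theorem pv_loop_none (S : List String) (t : String)
    (h1 : ¬ ("csb_sdlc_".toList <+: t.toList)) (h2 : ¬ ("ccb_".toList <+: t.toList)) :
    pvStripSuiteA S t = t := by
  induction S with
  | nil => rfl
  | cons s S ih =>
    unfold pvStripSuiteA
    have hc1 : ¬ PySem.Str.startswith t ("csb_sdlc_" ++ s ++ "_") = true := by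
      intro hc
      rw [pv_startswith_iff] at hc
      simp only [String.toList_append] at hc
      exact h1 (pv_prefix_of_fmt _ _ _ _ hc)
    have hc2 : ¬ PySem.Str.startswith t ("ccb_" ++ s ++ "_") = true := by
      intro hc
      rw [pv_startswith_iff] at hc
      simp only [String.toList_append] at hc
      exact h2 (pv_prefix_of_fmt _ _ _ _ hc)
    rw [if_neg hc1, if_neg hc2]
    exact ih

theorem pv_prefix_phase (t : String) :
    pvStripSuiteA pvSDLC_SUITES t =
      (if PySem.Str.startswith t "csb_sdlc_" then pvStripLeadB t "csb_sdlc_"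
       else if PySem.Str.startswith t "ccb_" then pvStripLeadB t "ccb_"
       else t) := by
  rw [pvSDLC_SUITES_eq]
  by_cases h1 : PySem.Str.startswith t "csb_sdlc_" = true
  · rw [if_pos h1, pvStripLeadB_eq_gen]
    have hp1 := (pv_startswith_iff _ _).mp h1
    have hcc := pv_lead_exclusive hp1
    refine pv_loop_gen _ _ pvSuites_no_underscore t hp1 ?_
    intro s S'
    have hc2 : ¬ PySem.Str.startswith t ("ccb_" ++ s ++ "_") = true := by
      intro hc
      rw [pv_startswith_iff] at hc
      simp only [String.toList_append] at hc
      exact hcc (pv_prefix_of_fmt _ _ _ _ hc)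
    unfold pvStripSuiteA
    rw [if_neg hc2]
    cases S' <;> rfl
  · rw [if_neg h1]
    have h1' : ¬ ("csb_sdlc_".toList <+: t.toList) := fun h => h1 ((pv_startswith_iff _ _).mpr h)
    by_cases h2 : PySem.Str.startswith t "ccb_" = true
    · rw [if_pos h2, pvStripLeadB_eq_gen]
      have hp2 := (pv_startswith_iff _ _).mp h2
      refine pv_loop_gen _ _ pvSuites_no_underscore t hp2 ?_
      intro s S'
      have hc1 : ¬ PySem.Str.startswith t ("csb_sdlc_" ++ s ++ "_") = true := by
        intro hc
        rw [pv_startswith_iff] at hc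
        simp only [String.toList_append] at hc
        exact h1' (pv_prefix_of_fmt _ _ _ _ hc)
      unfold pvStripSuiteA
      rw [if_neg hc1]
      cases S' <;> rfl
    · rw [if_neg h2]
      exact pv_loop_none _ _ h1' (fun h => h2 ((pv_startswith_iff _ _).mpr h))

-- ===== VERDICT (by name: the statement is the Claim_ definition above) =====
theorem get_task_name_from_dir_spec : Claim_equal_get_task_name_from_dir := by
  intro t _
  unfold Spec_get_task_name_from_dir get_task_name_from_dir get_task_name_from_dir_alt
  rw [pv_prefix_phase]
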